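-- pv_equiv track=rewrite | github.com/Shilenkovv/Algorithms_PyGen_bg | 8_simple_sorting_algorithms/8_5_5.py | count_holey_in_single_num
-- ===== SOURCE A (Python) =====
-- def count_holey_in_single_num(n: int):
--     dct = {num: 0 for num in range(10)}
--     dct.update({0: 1, 6: 1, 8: 2, 9: 1})
--     holeys = 0
--     divisor = 10
--
--     n = abs(n)
--     if n == 0:
--         return 1
--     while n != 0:
--         dig = n % divisor
--         holeys += dct.get(dig)
--         n = n // divisor
--     return holeys
-- ===== SOURCE B (Python) =====
-- def count_holey_in_single_num(n: int):
--     s = str(abs(n))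
--     return s.count('0') + s.count('6') + s.count('8') * 2 + s.count('9')
-- ===== Notes on version B (the rewrite author's own statement) =====
-- stated objective: simpler
-- what changed: Replaces the mod/div digit loop with a range(10) lookup dict and its special-case branch by converting the absolute value to its decimal string once and summing str.count over the four holey digit classes ('8' counted twice), with no special-case branch.
import Mathlib
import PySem

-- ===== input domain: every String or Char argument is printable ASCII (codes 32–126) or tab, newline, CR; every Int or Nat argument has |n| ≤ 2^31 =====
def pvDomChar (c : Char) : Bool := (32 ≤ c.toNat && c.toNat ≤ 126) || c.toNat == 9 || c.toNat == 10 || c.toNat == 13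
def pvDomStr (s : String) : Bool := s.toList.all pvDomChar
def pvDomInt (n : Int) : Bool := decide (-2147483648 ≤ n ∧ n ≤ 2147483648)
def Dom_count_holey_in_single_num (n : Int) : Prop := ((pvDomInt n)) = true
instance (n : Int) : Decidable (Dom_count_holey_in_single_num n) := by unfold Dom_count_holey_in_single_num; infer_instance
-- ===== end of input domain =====

-- B counts holes per holey digit class on the decimal string of abs(n) instead of A's
-- mod/div digit loop with a lookup dict; equal return values, no side effects in either.

-- ===== PORT A =====
-- dct = {num: 0 for num in range(10)}; dct.update({0: 1, 6: 1, 8: 2, 9: 1})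
def pvDctA : PySem.Dict Int Int :=
  ((((((PySem.List.pyRange 0 10 1).foldl (fun d num => d.insert num 0)
      PySem.Dict.empty).insert 0 1).insert 6 1).insert 8 2).insert 9 1)

-- A's while loop: dig = n % 10; holeys += dct.get(dig); n = n // 10.
-- The loop variable is abs(n) ≥ 0, so the 'm ≤ 0' exit coincides with Python's 'n != 0'
-- test (a totality guard only); dct.get(dig) always hits since dig ∈ 0..9, the getD
-- default 0 stands for the unreachable None.
def pvALoop (m holeys : Int) : Int :=
  if m ≤ 0 then holeys
  else pvALoop (PySem.Int.floordiv m 10) (holeys + pvDctA.getD (PySem.Int.mod m 10) 0)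
termination_by m.toNat
decreasing_by
  rw [PySem.Int.floordiv_eq_ediv_of_pos (by omega : (0:Int) < 10)]
  omega

def count_holey_in_single_num (n : Int) : Int :=
  let m := |n|
  if m = 0 then 1 else pvALoop m 0

-- ===== PORT B =====
def count_holey_in_single_num_alt (n : Int) : Int :=
  let s := PySem.Int.toStr |n|
  ((PySem.Str.count s "0" + PySem.Str.count s "6"
      + PySem.Str.count s "8" * 2 + PySem.Str.count s "9" : Nat) : Int)

-- ===== PRECONDITION & SPEC =====
def Spec_count_holey_in_single_num (n : Int) (out : Int) : Prop := out = count_holey_in_single_num_alt n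
instance (n : Int) (out : Int) : Decidable (Spec_count_holey_in_single_num n out) := by unfold Spec_count_holey_in_single_num; infer_instance

-- ===== CLAIM (what is proved, stated in full; the proofs are below) =====
def Claim_equal_count_holey_in_single_num : Prop := ∀ (n : Int), Dom_count_holey_in_single_num n → Spec_count_holey_in_single_num n (count_holey_in_single_num n)

-- ===== LEMMAS AND PROOFS =====

-- hole count of a single digit (A's dict values)
def pvHole (d : Int) : Int := if d = 8 then 2 else if d = 0 ∨ d = 6 ∨ d = 9 then 1 else 0

-- decimal digit characters of m, most significant first (= Nat.toDigits 10 m)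
def pvDigits (m : Nat) : List Char :=
  if m < 10 then [Nat.digitChar m]
  else pvDigits (m / 10) ++ [Nat.digitChar (m % 10)]
decreasing_by omega

-- B's weighted character count
def pvCH (l : List Char) : Int :=
  ((l.count '0' + l.count '6' + l.count '8' * 2 + l.count '9' : Nat) : Int)

lemma pvDctA_getD (k : Nat) (h : k < 10) : pvDctA.getD (k : Int) 0 = pvHole (k : Int) := by
  interval_cases k <;> decide

lemma pvCH_append (l₁ l₂ : List Char) : pvCH (l₁ ++ l₂) = pvCH l₁ + pvCH l₂ := by
  simp [pvCH, List.count_append]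
  ring

lemma pvCH_digitChar (k : Nat) (h : k < 10) : pvCH [Nat.digitChar k] = pvHole (k : Int) := by
  interval_cases k <;> decide

lemma pvALoop_eq (m : Nat) (h0 : 0 < m) : ∀ (acc : Int), pvALoop (m : Int) acc = acc + pvCH (pvDigits m) := by
  induction m using Nat.strong_induction_on with
  | _ m ih =>
    intro acc
    rw [pvALoop]
    have hfd : PySem.Int.floordiv ((m : Int)) 10 = ((m / 10 : Nat) : Int) := by
      rw [PySem.Int.floordiv_eq_ediv_of_pos (by omega : (0:Int) < 10)]; omega
    have hmd : PySem.Int.mod ((m : Int)) 10 = ((m % 10 : Nat) : Int) := by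
      rw [PySem.Int.mod_eq_emod_of_pos (by omega : (0:Int) < 10)]; omega
    rw [if_neg (by exact_mod_cast not_le.mpr h0), hfd, hmd,
      pvDctA_getD (m % 10) (Nat.mod_lt _ (by omega))]
    by_cases hm : m < 10
    · have h10 : m / 10 = 0 := Nat.div_eq_of_lt hm
      have hmod : m % 10 = m := Nat.mod_eq_of_lt hm
      rw [h10, pvALoop]
      simp only [Nat.cast_zero, le_refl, if_true]
      rw [pvDigits, if_pos hm, hmod, pvCH_digitChar m hm]
    · have hdiv : 0 < m / 10 := Nat.div_pos (by omega) (by omega)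
      conv_rhs => rw [pvDigits, if_neg hm]
      rw [ih (m / 10) (Nat.div_lt_self h0 (by omega)) hdiv, pvCH_append,
        pvCH_digitChar (m % 10) (Nat.mod_lt _ (by omega))]
      ring

lemma pvCountGo (c : Char) : ∀ (l : List Char) (fuel : Nat) (acc : Nat), l.length ≤ fuel →
    PySem.Chars.count.go [c] fuel l acc = acc + l.count c := by
  intro l
  induction l with
  | nil =>
    intro fuel acc _
    cases fuel <;> simp [PySem.Chars.count.go]
  | cons h t ih =>
    intro fuel acc hlen
    cases fuel with
    | zero => simp at hlen
    | succ f =>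
      rw [PySem.Chars.count.go]
      simp only [List.isPrefixOf, List.length_cons] at *
      by_cases hc : c = h
      · subst hc
        simp only [BEq.rfl, Bool.true_and, if_true, List.drop_succ_cons,
          List.length_nil, List.drop_zero]
        rw [ih f (acc + 1) (by omega), List.count_cons_self]
        omega
      · have : (c == h) = false := by simp [hc]
        simp only [this, Bool.false_and, Bool.false_eq_true, if_false]
        rw [ih f acc (by omega), List.count_cons_of_ne (fun he => hc he.symm)]

lemma pvCount_single (l : List Char) (c : Char) : PySem.Chars.count l [c] = l.count c := by
  rw [PySem.Chars.count]
  simp only [List.isEmpty_cons, if_false, Bool.false_eq_true]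
  rw [pvCountGo c l l.length 0 le_rfl, Nat.zero_add]

lemma pvToDigitsCore_eq : ∀ (fuel m : Nat) (ds : List Char), m < fuel →
    Nat.toDigitsCore 10 fuel m ds = pvDigits m ++ ds := by
  intro fuel
  induction fuel with
  | zero => intro m ds h; omega
  | succ f ih =>
    intro m ds h
    rw [Nat.toDigitsCore]
    by_cases hm : m < 10
    · have h10 : m / 10 = 0 := Nat.div_eq_of_lt hm
      have hmod : m % 10 = m := Nat.mod_eq_of_lt hm
      simp only [h10, if_true, hmod]
      rw [pvDigits, if_pos hm]
      simp
    · have hdiv : m / 10 ≠ 0 := by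
        have := Nat.div_pos (le_of_not_gt hm) (by omega); omega
      simp only [hdiv, if_false]
      rw [ih (m / 10) _ (by omega)]
      conv_rhs => rw [pvDigits]
      rw [if_neg hm]
      simp

lemma pvToDigits_eq (m : Nat) : Nat.toDigits 10 m = pvDigits m := by
  rw [Nat.toDigits, pvToDigitsCore_eq (m + 1) m [] (by omega)]
  simp

lemma pvAlt_eq (n : Int) : count_holey_in_single_num_alt n = pvCH (pvDigits n.natAbs) := by
  have habs : ¬ (|n| < 0) := not_lt.mpr (abs_nonneg n)
  have htoNat : |n|.toNat = n.natAbs := by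
    rw [Int.abs_eq_natAbs]; exact Int.toNat_natCast _
  simp only [count_holey_in_single_num_alt, PySem.Str.count, PySem.Int.toStr,
    String.toList_ofList, PySem.Int.toChars, habs, if_false, htoNat, pvToDigits_eq]
  have h0 : ("0" : String).toList = ['0'] := rfl
  have h6 : ("6" : String).toList = ['6'] := rfl
  have h8 : ("8" : String).toList = ['8'] := rfl
  have h9 : ("9" : String).toList = ['9'] := rfl
  rw [h0, h6, h8, h9, pvCount_single, pvCount_single, pvCount_single, pvCount_single]
  rfl

-- ===== VERDICT (by name: the statement is the Claim_ definition above) =====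
theorem count_holey_in_single_num_spec : Claim_equal_count_holey_in_single_num := by
  intro n _
  unfold Spec_count_holey_in_single_num count_holey_in_single_num
  rw [pvAlt_eq, Int.abs_eq_natAbs]
  by_cases h : n.natAbs = 0
  · simp only [h, Nat.cast_zero, if_true]
    rw [pvDigits]
    norm_num
    decide
  · have hpos : 0 < n.natAbs := Nat.pos_of_ne_zero h
    rw [if_neg (by exact_mod_cast h), pvALoop_eq n.natAbs hpos 0, zero_add]
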